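-- pv_equiv track=rewrite | github.com/West-wise/CoTe | 백준/Gold/2638. 치즈/치즈.py | melt_cheese
-- ===== SOURCE A (Python) =====
-- def melt_cheese(board, air, n, m):
--     melt_positions = []
--     directions = [(-1, 0), (1, 0), (0, -1), (0, 1)]
--
--     for i in range(n):
--         for j in range(m):
--             if board[i][j] == 1:
--                 contact_count = 0
--                 for dx, dy in directions:
--                     ni, nj = i + dx, j + dy
--                     if 0 <= ni < n and 0 <= nj < m and air[ni][nj]:
--                         contact_count += 1
--                 if contact_count >= 2:
--                     melt_positions.append((i, j))
--
--     for i, j in melt_positions: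
--         board[i][j] = 0
--
--     return len(melt_positions) > 0
-- ===== SOURCE B (Python) =====
-- def melt_cheese(board, air, n, m):
--     # Scatter from air cells into a counter keyed by cheese cell,
--     # instead of gathering per cheese cell as A does.
--     count = {}
--     for i in range(n):
--         for j in range(m):
--             if air[i][j]:
--                 for ni, nj in ((i - 1, j), (i + 1, j), (i, j - 1), (i, j + 1)):
--                     if 0 <= ni < n and 0 <= nj < m and board[ni][nj] == 1:
--                         key = (ni, nj)
--                         count[key] = count.get(key, 0) + 1
--     melt_positions = [pos for pos, c in count.items() if c >= 2]
--     for i, j in melt_positions: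
--         board[i][j] = 0
--     return len(melt_positions) > 0
-- ===== Notes on version B (the rewrite author's own statement) =====
-- stated objective: alternative
-- what changed: B scatters: it loops over air cells and increments a dict counter at each in-range cheese neighbor, then melts cells whose counter reached 2, instead of A's gather loop that counts air neighbors per cheese cell; same O(n*m) cost, different traversal and state (a counter keyed by cheese cell instead of a per-cell direction scan).
-- outside the precondition, e.g. on melt_cheese([[0]], [[]], 1, 1): A returns False, B raises IndexError
import Mathlib
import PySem

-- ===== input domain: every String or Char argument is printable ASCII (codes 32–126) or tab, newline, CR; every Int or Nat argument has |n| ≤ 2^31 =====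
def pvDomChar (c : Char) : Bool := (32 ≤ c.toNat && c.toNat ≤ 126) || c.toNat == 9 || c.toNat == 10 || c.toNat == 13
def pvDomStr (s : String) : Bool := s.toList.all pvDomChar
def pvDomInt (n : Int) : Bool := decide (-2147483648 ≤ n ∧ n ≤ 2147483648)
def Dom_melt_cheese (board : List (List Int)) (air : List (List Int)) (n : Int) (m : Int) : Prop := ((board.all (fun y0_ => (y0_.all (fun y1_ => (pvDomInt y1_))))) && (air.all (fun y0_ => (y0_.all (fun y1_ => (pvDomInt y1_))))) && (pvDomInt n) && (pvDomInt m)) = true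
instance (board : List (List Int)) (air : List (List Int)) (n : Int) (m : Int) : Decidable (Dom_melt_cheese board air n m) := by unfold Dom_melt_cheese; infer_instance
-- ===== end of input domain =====

-- B replaces A's per-cheese-cell gather of air neighbors by a scatter from air cells into a
-- counter keyed by cheese cell (alternative decomposition, same cost). Both Pythons mutate
-- `board` identically (melted cells set to 0); the equivalence proved here is about the return value.

-- ===== PORT A =====
def melt_cheese (board : List (List Int)) (air : List (List Int)) (n : Int) (m : Int) : Bool :=
  let directions : List (Int × Int) := [(-1, 0), (1, 0), (0, -1), (0, 1)]
  let melt_positions : List (Int × Int) :=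
    (PySem.List.pyRange 0 n 1).foldl (fun acc i =>
      (PySem.List.pyRange 0 m 1).foldl (fun acc j =>
        if PySem.List.pyGetD (PySem.List.pyGetD board i []) j 0 = 1 then
          let contact_count : Int :=
            directions.foldl (fun c d =>
              if 0 ≤ i + d.1 ∧ i + d.1 < n ∧ 0 ≤ j + d.2 ∧ j + d.2 < m ∧
                 PySem.List.pyGetD (PySem.List.pyGetD air (i + d.1) []) (j + d.2) 0 ≠ 0
              then c + 1 else c) 0
          if 2 ≤ contact_count then acc ++ [(i, j)] else acc
        else acc) acc) []
  -- the final write-back loop only mutates `board`; the returned value is len(melt_positions) > 0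
  decide (0 < melt_positions.length)

-- ===== PORT B =====
def melt_cheese_alt (board : List (List Int)) (air : List (List Int)) (n : Int) (m : Int) : Bool :=
  let count : PySem.Dict (Int × Int) Int :=
    (PySem.List.pyRange 0 n 1).foldl (fun d i =>
      (PySem.List.pyRange 0 m 1).foldl (fun d j =>
        if PySem.List.pyGetD (PySem.List.pyGetD air i []) j 0 ≠ 0 then
          ([(i - 1, j), (i + 1, j), (i, j - 1), (i, j + 1)] : List (Int × Int)).foldl (fun d p =>
            if 0 ≤ p.1 ∧ p.1 < n ∧ 0 ≤ p.2 ∧ p.2 < m ∧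
               PySem.List.pyGetD (PySem.List.pyGetD board p.1 []) p.2 0 = 1
            then d.insert p (d.getD p 0 + 1) else d) d
        else d) d) PySem.Dict.empty
  let melt_positions : List (Int × Int) :=
    (count.items.filter (fun pc => decide (2 ≤ pc.2))).map (·.1)
  -- the write-back loop only mutates `board`; the returned value is len(melt_positions) > 0
  decide (0 < melt_positions.length)

-- ===== PRECONDITION & SPEC =====
-- Pre_ excludes the inputs where either Python raises IndexError (a grid too small for the
-- n×m scan): A indexes every board cell and the air cells next to cheese, B indexes every air
-- cell and the board cells next to air; Pre_ requires both grids to cover the first n rows up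
-- to width m whenever 0 < n and 0 < m, which also drops some inputs where A happens to return
-- (air rows missing only at cells A never reads) but B would raise.
def Pre_melt_cheese (board : List (List Int)) (air : List (List Int)) (n : Int) (m : Int) : Prop :=
  0 < n ∧ 0 < m →
    n ≤ (board.length : Int) ∧ n ≤ (air.length : Int) ∧
    (∀ row ∈ board.take n.toNat, m ≤ (row.length : Int)) ∧
    (∀ row ∈ air.take n.toNat, m ≤ (row.length : Int))
instance (board : List (List Int)) (air : List (List Int)) (n : Int) (m : Int) : Decidable (Pre_melt_cheese board air n m) := by unfold Pre_melt_cheese; infer_instance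
def pvWitness_melt_cheese : List (List Int) × List (List Int) × Int × Int :=
  ([[1, 1], [0, 1]], [[1, 0], [1, 1]], 2, 2)
def Spec_melt_cheese (board : List (List Int)) (air : List (List Int)) (n : Int) (m : Int) (out : Bool) : Prop := out = melt_cheese_alt board air n m
instance (board : List (List Int)) (air : List (List Int)) (n : Int) (m : Int) (out : Bool) : Decidable (Spec_melt_cheese board air n m out) := by unfold Spec_melt_cheese; infer_instance

-- ===== CLAIM (what is proved, stated in full; the proofs are below) =====
def Claim_equal_melt_cheese : Prop := ∀ (board : List (List Int)) (air : List (List Int)) (n : Int) (m : Int), Dom_melt_cheese board air n m → Pre_melt_cheese board air n m → Spec_melt_cheese board air n m (melt_cheese board air n m)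

-- ===== LEMMAS AND PROOFS =====

-- g[p.1][p.2] read with defaults (both ports read cells this way)
def pvCell (g : List (List Int)) (p : Int × Int) : Int :=
  PySem.List.pyGetD (PySem.List.pyGetD g p.1 []) p.2 0

-- the four neighbours of a cell, in the order both ports visit them
def pvNbrs (p : Int × Int) : List (Int × Int) :=
  [(p.1 - 1, p.2), (p.1 + 1, p.2), (p.1, p.2 - 1), (p.1, p.2 + 1)]

-- "in-range air cell": the test guarding A's contact increment
def pvAirOK (air : List (List Int)) (n m : Int) (r : Int × Int) : Bool :=
  decide (0 ≤ r.1 ∧ r.1 < n ∧ 0 ≤ r.2 ∧ r.2 < m ∧ pvCell air r ≠ 0)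

-- "in-range cheese cell": the test guarding B's counter increment
def pvQ (board : List (List Int)) (n m : Int) (p : Int × Int) : Bool :=
  decide (0 ≤ p.1 ∧ p.1 < n ∧ 0 ≤ p.2 ∧ p.2 < m ∧ pvCell board p = 1)

-- A's contact count of a cell, as a closed expression
def pvGatherI (air : List (List Int)) (n m : Int) (p : Int × Int) : Int :=
  ((pvNbrs p).countP (pvAirOK air n m) : Nat)

-- all cells of the n×m grid, row-major
def pvProd (n m : Int) : List (Int × Int) :=
  (PySem.List.pyRange 0 n 1).flatMap (fun i => (PySem.List.pyRange 0 m 1).map (fun j => (i, j)))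

-- the stream of counter increments B performs: for each air cell, its in-range cheese neighbours
def pvL (board air : List (List Int)) (n m : Int) : List (Int × Int) :=
  (pvProd n m).flatMap (fun p =>
    if pvCell air p ≠ 0 then (pvNbrs p).filter (pvQ board n m) else [])

theorem pvNbrs_nodup (p : Int × Int) : (pvNbrs p).Nodup := by
  obtain ⟨a, b⟩ := p
  simp [pvNbrs, Prod.ext_iff]
  omega

theorem pvMem_nbrs_symm (p k : Int × Int) : k ∈ pvNbrs p ↔ p ∈ pvNbrs k := by
  obtain ⟨a, b⟩ := p; obtain ⟨x, y⟩ := k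
  simp [pvNbrs, Prod.ext_iff]
  omega

theorem pvMem_prod (n m : Int) (p : Int × Int) :
    p ∈ pvProd n m ↔ 0 ≤ p.1 ∧ p.1 < n ∧ 0 ≤ p.2 ∧ p.2 < m := by
  obtain ⟨a, b⟩ := p
  simp only [pvProd, List.mem_flatMap, List.mem_map, PySem.List.mem_pyRange_one, Prod.mk.injEq]
  constructor
  · rintro ⟨i, hi, j, hj, rfl, rfl⟩; exact ⟨hi.1, hi.2, hj.1, hj.2⟩
  · rintro ⟨h1, h2, h3, h4⟩; exact ⟨a, ⟨h1, h2⟩, b, ⟨h3, h4⟩, rfl, rfl⟩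

theorem pvProd_nodup (n m : Int) : (pvProd n m).Nodup := by
  refine List.nodup_flatMap.2 ⟨fun i _ => ?_, ?_⟩
  · exact (PySem.List.nodup_pyRange_one 0 m).map (fun j j' h => by
      simpa using congrArg Prod.snd h)
  · refine (PySem.List.nodup_pyRange_one 0 n).imp ?_
    intro i i' hne
    simp only [Function.onFun, List.disjoint_left]
    rintro p hp hq
    simp only [List.mem_map] at hp hq
    obtain ⟨j, _, rfl⟩ := hp
    obtain ⟨j', _, h⟩ := hq
    exact hne (by simpa using (congrArg Prod.fst h).symm)

-- count a value in a flatMap whose chunks each contain it 0 or 1 times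
theorem pvCount_flatMap_eq_countP {α β : Type} [BEq β] (l : List α) (g : α → List β)
    (k : β) (c : α → Bool) (h : ∀ p ∈ l, (g p).count k = if c p then 1 else 0) :
    (l.flatMap g).count k = l.countP c := by
  induction l with
  | nil => simp
  | cons x xs ih =>
    simp only [List.flatMap_cons, List.count_append, List.countP_cons]
    rw [ih (fun p hp => h p (List.mem_cons_of_mem _ hp)), h x List.mem_cons_self]
    split_ifs <;> omega

theorem pvCount_pvL (board air : List (List Int)) (n m : Int) (k : Int × Int)
    (hk : pvQ board n m k = true) :
    ((pvL board air n m).count k : Int) = pvGatherI air n m k := by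
  have hstep : ∀ p ∈ pvProd n m,
      ((if pvCell air p ≠ 0 then (pvNbrs p).filter (pvQ board n m) else []).count k)
        = if (decide (pvCell air p ≠ 0) && decide (k ∈ pvNbrs p)) then 1 else 0 := by
    intro p _
    by_cases ha : pvCell air p ≠ 0
    · rw [if_pos ha, List.count_filter hk]
      by_cases hm : k ∈ pvNbrs p
      · rw [List.count_eq_one_of_mem (pvNbrs_nodup p) hm, if_pos (by simp [ha, hm])]
      · rw [List.count_eq_zero_of_not_mem hm, if_neg (by simp [hm])]
    · rw [if_neg ha, List.count_nil, if_neg (by simp [not_not.1 ha])]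
  rw [pvL, pvCount_flatMap_eq_countP _ _ _ _ hstep]
  -- countP over the grid = countP over the 4 neighbours, by a bijection between the two filters
  have hperm : ((pvProd n m).filter (fun p => decide (pvCell air p ≠ 0) && decide (k ∈ pvNbrs p))).Perm
      ((pvNbrs k).filter (pvAirOK air n m)) := by
    rw [List.perm_ext_iff_of_nodup ((pvProd_nodup n m).filter _) ((pvNbrs_nodup k).filter _)]
    intro r
    simp only [List.mem_filter, pvMem_prod, pvAirOK, Bool.and_eq_true, decide_eq_true_eq,
      pvMem_nbrs_symm r k]
    tauto
  rw [List.countP_eq_length_filter, hperm.length_eq, pvGatherI, List.countP_eq_length_filter]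

theorem pvMem_pvL (board air : List (List Int)) (n m : Int) (k : Int × Int)
    (hk : k ∈ pvL board air n m) : pvQ board n m k = true := by
  simp only [pvL, List.mem_flatMap] at hk
  obtain ⟨p, _, hmem⟩ := hk
  by_cases ha : pvCell air p ≠ 0
  · rw [if_pos ha] at hmem; exact (List.mem_filter.1 hmem).2
  · rw [if_neg ha] at hmem; cases hmem

-- the common characterisation both return values reduce to
def pvSpec (board air : List (List Int)) (n m : Int) : Prop :=
  ∃ p : Int × Int, pvQ board n m p = true ∧ 2 ≤ pvGatherI air n m p

theorem pvMap_dirs (i j : Int) :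
    ([(-1, 0), (1, 0), (0, -1), (0, 1)] : List (Int × Int)).map (fun d => (i + d.1, j + d.2))
      = pvNbrs (i, j) := by
  simp [pvNbrs, Prod.ext_iff]
  omega

-- A's contact loop computes pvGatherI
theorem pvContact_eq (air : List (List Int)) (n m i j : Int) :
    ([(-1, 0), (1, 0), (0, -1), (0, 1)] : List (Int × Int)).foldl (fun c d =>
      if 0 ≤ i + d.1 ∧ i + d.1 < n ∧ 0 ≤ j + d.2 ∧ j + d.2 < m ∧
         PySem.List.pyGetD (PySem.List.pyGetD air (i + d.1) []) (j + d.2) 0 ≠ 0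
      then c + 1 else c) 0 = pvGatherI air n m (i, j) := by
  rw [PySem.List.foldl_ite_add_one, pvGatherI, ← pvMap_dirs i j, List.countP_map, zero_add]
  rfl

theorem pvA_iff (board air : List (List Int)) (n m : Int) :
    melt_cheese board air n m = true ↔ pvSpec board air n m := by
  unfold melt_cheese
  simp only []
  have hrow : ∀ (i : Int) (acc : List (Int × Int)),
      (PySem.List.pyRange 0 m 1).foldl (fun acc j =>
        if PySem.List.pyGetD (PySem.List.pyGetD board i []) j 0 = 1 then
          if 2 ≤ ([(-1, 0), (1, 0), (0, -1), (0, 1)] : List (Int × Int)).foldl (fun (c : Int) d =>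
              if 0 ≤ i + d.1 ∧ i + d.1 < n ∧ 0 ≤ j + d.2 ∧ j + d.2 < m ∧
                 PySem.List.pyGetD (PySem.List.pyGetD air (i + d.1) []) (j + d.2) 0 ≠ 0
              then c + 1 else c) (0 : Int)
          then acc ++ [(i, j)] else acc
        else acc) acc
      = acc ++ ((PySem.List.pyRange 0 m 1).filter (fun j =>
          decide (pvCell board (i, j) = 1 ∧ 2 ≤ pvGatherI air n m (i, j)))).map (fun j => (i, j)) := by
    intro i acc
    rw [PySem.List.foldl_congr_mem _ _
      (fun acc j => if pvCell board (i, j) = 1 ∧ 2 ≤ pvGatherI air n m (i, j)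
        then acc ++ [(i, j)] else acc) _ ?_]
    · exact PySem.List.foldl_append_ite _ (fun j => (i, j)) _ acc
    · intro acc j _
      rw [pvContact_eq air n m i j]
      by_cases h1 : pvCell board (i, j) = 1 <;> by_cases h2 : 2 ≤ pvGatherI air n m (i, j) <;>
        simp [pvCell, h2]
  rw [PySem.List.foldl_congr_mem _ _
    (fun acc i => acc ++ ((PySem.List.pyRange 0 m 1).filter (fun j =>
        decide (pvCell board (i, j) = 1 ∧ 2 ≤ pvGatherI air n m (i, j)))).map (fun j => (i, j))) _
    (fun acc i _ => hrow i acc)]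
  rw [PySem.List.foldl_append_eq_flatMap, List.nil_append]
  rw [decide_eq_true_iff, List.length_pos_iff_exists_mem]
  simp only [List.mem_flatMap, List.mem_map, List.mem_filter, PySem.List.mem_pyRange_one,
    decide_eq_true_eq]
  constructor
  · rintro ⟨p, i, hi, j, ⟨hj, hc, hg⟩, rfl⟩
    exact ⟨(i, j), by simp [pvQ]; exact ⟨hi.1, hi.2, hj.1, hj.2, hc⟩, hg⟩
  · rintro ⟨p, hq, hg⟩
    simp only [pvQ, decide_eq_true_eq] at hq
    exact ⟨p, p.1, ⟨hq.1, hq.2.1⟩, p.2, ⟨⟨hq.2.2.1, hq.2.2.2.1⟩, hq.2.2.2.2, by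
      obtain ⟨a, b⟩ := p; exact hg⟩, by obtain ⟨a, b⟩ := p; rfl⟩

theorem pvFoldl_flatMap {α β γ : Type} (l : List α) (g : α → List β) (f : γ → β → γ)
    (init : γ) : (l.flatMap g).foldl f init = l.foldl (fun acc x => (g x).foldl f acc) init := by
  induction l generalizing init with
  | nil => rfl
  | cons x xs ih => rw [List.flatMap_cons, List.foldl_append, List.foldl_cons, ih]

theorem pvCount_eq (board air : List (List Int)) (n m : Int) :
    (pvL board air n m).foldl (fun d x => d.insert x (d.getD x 0 + 1))
        (PySem.Dict.empty : PySem.Dict (Int × Int) Int)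
      = (PySem.List.pyRange 0 n 1).foldl (fun d i =>
          (PySem.List.pyRange 0 m 1).foldl (fun d j =>
            if PySem.List.pyGetD (PySem.List.pyGetD air i []) j 0 ≠ 0 then
              ([(i - 1, j), (i + 1, j), (i, j - 1), (i, j + 1)] : List (Int × Int)).foldl (fun d p =>
                if 0 ≤ p.1 ∧ p.1 < n ∧ 0 ≤ p.2 ∧ p.2 < m ∧
                   PySem.List.pyGetD (PySem.List.pyGetD board p.1 []) p.2 0 = 1
                then d.insert p (d.getD p 0 + 1) else d) d
            else d) d) PySem.Dict.empty := by
  rw [pvL, pvProd, pvFoldl_flatMap, pvFoldl_flatMap]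
  simp only [List.foldl_map]
  refine PySem.List.foldl_congr_mem _ _ _ _ ?_
  intro d i _
  refine PySem.List.foldl_congr_mem _ _ _ _ ?_
  intro d j _
  by_cases ha : pvCell air (i, j) ≠ 0
  · rw [if_pos ha,
      if_pos (show PySem.List.pyGetD (PySem.List.pyGetD air i []) j 0 ≠ 0 from ha),
      PySem.List.foldl_ite_eq_foldl_filter
        (fun p : Int × Int => 0 ≤ p.1 ∧ p.1 < n ∧ 0 ≤ p.2 ∧ p.2 < m ∧
          PySem.List.pyGetD (PySem.List.pyGetD board p.1 []) p.2 0 = 1)]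
    rfl
  · rw [if_neg ha,
      if_neg (show ¬ PySem.List.pyGetD (PySem.List.pyGetD air i []) j 0 ≠ 0 from ha)]
    rfl

theorem pvB_iff (board air : List (List Int)) (n m : Int) :
    melt_cheese_alt board air n m = true ↔ pvSpec board air n m := by
  unfold melt_cheese_alt
  simp only []
  rw [← pvCount_eq, PySem.Dict.foldl_insert_getD_add_one_eq_counter, PySem.Dict.items_counter]
  rw [decide_eq_true_iff, List.length_pos_iff_exists_mem]
  simp only [List.mem_map, List.mem_filter, PySem.Set.mem_ofList, decide_eq_true_eq]
  constructor
  · rintro ⟨a, pair, ⟨⟨k, hkmem, rfl⟩, hk2⟩, rfl⟩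
    have hq := pvMem_pvL board air n m k hkmem
    refine ⟨k, hq, ?_⟩
    rw [← pvCount_pvL board air n m k hq]
    simpa using hk2
  · rintro ⟨p, hq, hg⟩
    have hc := pvCount_pvL board air n m p hq
    refine ⟨p, (p, ((pvL board air n m).count p : Int)), ⟨⟨p, ?_, rfl⟩, ?_⟩, rfl⟩
    · exact List.count_pos_iff.1 (by omega)
    · simpa [hc] using hg

-- ===== VERDICT (by name: the statement is the Claim_ definition above) =====
theorem melt_cheese_spec : Claim_equal_melt_cheese := by
  intro board air n m _ _
  unfold Spec_melt_cheese
  have h := (pvA_iff board air n m).trans (pvB_iff board air n m).symm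
  cases hA : melt_cheese board air n m <;> cases hB : melt_cheese_alt board air n m <;>
    simp_all
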